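-- pv_equiv track=rewrite | github.com/pypi-data/pypi-mirror-399 | packages/drace/drace-0.1.3.tar.gz/drace-0.1.3/drace/darkian/alignment.py | _group_assignments_by_indent
-- ===== SOURCE A (Python) =====
-- def _line_indentation(line: str) -> int:
--     """Count leading spaces (or tabs)"""
--     return len(line) - len(line.lstrip(' '))
--
-- def _group_assignments_by_indent(assign_line_numbers: list[int], lines: list[str]) -> list[list[int]]:
--     groups        = []
--     current_group = []
--     last_indent   = None
--
--     for i, lineno in enumerate(assign_line_numbers):
--         line   = lines[lineno - 1]
--         indent = _line_indentation(line)
--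
--         if not current_group:
--             current_group.append(lineno)
--             last_indent = indent
--             continue
--
--         prev_lineno = assign_line_numbers[i - 1]
--         if lineno == prev_lineno + 1:
--             if indent == last_indent and lines[prev_lineno].strip():
--                 current_group.append(lineno)
--             else:
--                 groups.append(current_group)
--                 current_group = [lineno]
--                 last_indent   = indent
--         else:
--             groups.append(current_group)
--             current_group = [lineno]
--             last_indent   = indent
--
--     if current_group: groups.append(current_group)
--
--     return groups
-- ===== SOURCE B (Python) =====
-- def _line_indentation(line: str) -> int:
--     """Count leading spaces (or tabs)"""
--     return len(line) - len(line.lstrip(' '))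
--
-- def _group_assignments_by_indent(assign_line_numbers: list[int], lines: list[str]) -> list[list[int]]:
--     # Span decomposition: consume the line numbers as maximal "chains" (consecutive
--     # line numbers, equal indentation, non-blank line) using a stack, one group per chain.
--     def chained(prev: int, cur: int) -> bool:
--         return (cur == prev + 1
--                 and _line_indentation(lines[cur - 1]) == _line_indentation(lines[prev - 1])
--                 and bool(lines[cur - 1].strip()))
--
--     groups = []
--     stack = list(reversed(assign_line_numbers))
--     while stack:
--         group = [stack.pop()]
--         while stack and chained(group[-1], stack[-1]):
--             group.append(stack.pop())
--         groups.append(group)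
--     return groups
-- ===== Notes on version B (the rewrite author's own statement) =====
-- stated objective: alternative
-- what changed: Replaces A's single-pass accumulator with current_group/last_indent state and index look-back by a span decomposition: a binary 'chained' predicate on adjacent line numbers and a stack-driven loop that pops one maximal chain per group, with no cached indentation state.
import Mathlib
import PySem

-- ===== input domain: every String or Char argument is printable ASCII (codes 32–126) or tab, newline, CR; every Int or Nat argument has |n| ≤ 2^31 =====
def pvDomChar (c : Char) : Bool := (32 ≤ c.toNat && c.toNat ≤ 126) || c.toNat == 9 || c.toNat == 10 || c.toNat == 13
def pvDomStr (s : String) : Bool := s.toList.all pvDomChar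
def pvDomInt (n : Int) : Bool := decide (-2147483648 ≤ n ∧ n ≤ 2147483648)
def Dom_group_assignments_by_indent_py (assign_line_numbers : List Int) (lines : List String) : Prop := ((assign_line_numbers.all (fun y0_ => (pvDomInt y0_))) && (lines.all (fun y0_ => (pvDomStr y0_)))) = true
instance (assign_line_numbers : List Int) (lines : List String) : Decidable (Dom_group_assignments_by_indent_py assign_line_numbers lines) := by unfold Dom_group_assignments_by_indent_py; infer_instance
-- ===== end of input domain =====

-- B replaces A's stateful accumulator (current_group / last_indent / index look-back) by a
-- span decomposition: pop maximal chains of consecutive, equally indented, non-blank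
-- assignment lines off a stack, one group per chain (objective: alternative decomposition).

-- _line_indentation(line) = len(line) - len(line.lstrip(' ')); lstrip(' ') ported by hand as
-- dropWhile (· == ' ') — exact: lstrip with an explicit char set drops exactly leading ' '.
def pvLineIndent (line : String) : Int :=
  (line.toList.length : Int) - ((line.toList.dropWhile (· == ' ')).length : Int)

-- ===== PORT A =====
-- the for-loop over enumerate(assign_line_numbers) with state (groups, current_group, last_indent)
def pvLoopA (assign : List Int) (lines : List String) :
    List (List Int) × List Int × Option Int → List (Int × Int) → List (List Int) × List Int × Option Int
  | st, [] => st
  | (groups, current, lastIndent), (i, lineno) :: rest =>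
    let line := (PySem.List.pyGet? lines (lineno - 1)).getD ""
    let indent := pvLineIndent line
    if current = [] then
      pvLoopA assign lines (groups, current ++ [lineno], some indent) rest
    else
      let prevLineno := (PySem.List.pyGet? assign (i - 1)).getD 0
      if lineno = prevLineno + 1 then
        if some indent = lastIndent ∧ PySem.Str.strip ((PySem.List.pyGet? lines prevLineno).getD "") ≠ "" then
          pvLoopA assign lines (groups, current ++ [lineno], lastIndent) rest
        else
          pvLoopA assign lines (groups ++ [current], [lineno], some indent) rest
      else
        pvLoopA assign lines (groups ++ [current], [lineno], some indent) rest

-- the trailing 'if current_group: groups.append(current_group)'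
def pvFinishA (st : List (List Int) × List Int × Option Int) : List (List Int) :=
  if st.2.1 ≠ [] then st.1 ++ [st.2.1] else st.1

def group_assignments_by_indent_py (assign_line_numbers : List Int) (lines : List String) : List (List Int) :=
  pvFinishA (pvLoopA assign_line_numbers lines ([], [], none) (PySem.List.enumerate assign_line_numbers))

-- ===== PORT B =====
-- chained(prev, cur)
def pvChained (lines : List String) (prev cur : Int) : Bool :=
  cur == prev + 1 &&
  pvLineIndent ((PySem.List.pyGet? lines (cur - 1)).getD "") == pvLineIndent ((PySem.List.pyGet? lines (prev - 1)).getD "") &&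
  PySem.Str.strip ((PySem.List.pyGet? lines (cur - 1)).getD "") != ""

-- inner 'while stack and chained(group[-1], stack[-1]): group.append(stack.pop())'
def pvInner (lines : List String) (group stack : List Int) : List Int × List Int :=
  if h : stack ≠ [] ∧ pvChained lines (group.getLastD 0) (stack.getLastD 0) then
    pvInner lines (group ++ [stack.getLastD 0]) stack.dropLast
  else (group, stack)
termination_by stack.length
decreasing_by
  have h1 : stack.dropLast.length = stack.length - 1 := List.length_dropLast
  have h2 : 0 < stack.length := List.length_pos_iff.mpr h.1
  omega

lemma pvInner_len (lines : List String) (group stack : List Int) :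
    (pvInner lines group stack).2.length ≤ stack.length := by
  fun_induction pvInner lines group stack with
  | case1 group stack h ih =>
    have h1 : stack.dropLast.length = stack.length - 1 := List.length_dropLast
    have h2 : 0 < stack.length := List.length_pos_iff.mpr h.1
    omega
  | case2 group stack h => exact Nat.le_refl _

-- outer 'while stack: group = [stack.pop()]; …; groups.append(group)'
def pvOuter (lines : List String) (groups : List (List Int)) (stack : List Int) : List (List Int) :=
  if h : stack ≠ [] then
    let p := pvInner lines [stack.getLastD 0] stack.dropLast
    pvOuter lines (groups ++ [p.1]) p.2
  else groups
termination_by stack.length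
decreasing_by
  have h1 : (pvInner lines [stack.getLastD 0] stack.dropLast).2.length ≤ stack.dropLast.length :=
    pvInner_len lines [stack.getLastD 0] stack.dropLast
  have h2 : stack.dropLast.length = stack.length - 1 := List.length_dropLast
  have h3 : 0 < stack.length := List.length_pos_iff.mpr h
  omega

def group_assignments_by_indent_py_alt (assign_line_numbers : List Int) (lines : List String) : List (List Int) :=
  pvOuter lines [] assign_line_numbers.reverse

-- ===== PRECONDITION & SPEC =====
-- Pre_ excludes exactly the inputs on which Python A raises IndexError: some line number
-- indexes lines[lineno - 1] out of Python's range (negative wrap-around indices are kept).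
def Pre_group_assignments_by_indent_py (assign_line_numbers : List Int) (lines : List String) : Prop :=
  ∀ x ∈ assign_line_numbers, 1 - (lines.length : Int) ≤ x ∧ x ≤ (lines.length : Int)
instance (assign_line_numbers : List Int) (lines : List String) : Decidable (Pre_group_assignments_by_indent_py assign_line_numbers lines) := by unfold Pre_group_assignments_by_indent_py; infer_instance

def pvWitness_group_assignments_by_indent_py : List Int × List String :=
  ([1, 2, 4], ["a = 1", "b = 2", "", "c = 3"])

def Spec_group_assignments_by_indent_py (assign_line_numbers : List Int) (lines : List String) (out : List (List Int)) : Prop := out = group_assignments_by_indent_py_alt assign_line_numbers lines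
instance (assign_line_numbers : List Int) (lines : List String) (out : List (List Int)) : Decidable (Spec_group_assignments_by_indent_py assign_line_numbers lines out) := by unfold Spec_group_assignments_by_indent_py; infer_instance

-- ===== CLAIM (what is proved, stated in full; the proofs are below) =====
def Claim_equal_group_assignments_by_indent_py : Prop := ∀ (assign_line_numbers : List Int) (lines : List String), Dom_group_assignments_by_indent_py assign_line_numbers lines → Pre_group_assignments_by_indent_py assign_line_numbers lines → Spec_group_assignments_by_indent_py assign_line_numbers lines (group_assignments_by_indent_py assign_line_numbers lines)

-- ===== LEMMAS AND PROOFS =====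

-- reference: take the maximal chain, then split the rest (proof-side only)
def pvTakeChain (lines : List String) : List Int → List Int → List Int × List Int
  | group, [] => (group, [])
  | group, r :: rs =>
    if pvChained lines (group.getLastD 0) r then pvTakeChain lines (group ++ [r]) rs
    else (group, r :: rs)

lemma pvTakeChain_len (lines : List String) : ∀ (rest group : List Int),
    (pvTakeChain lines group rest).2.length ≤ rest.length := by
  intro rest
  induction rest with
  | nil => intro group; simp [pvTakeChain]
  | cons r rs ih =>
    intro group
    rw [pvTakeChain]
    split
    · exact Nat.le_trans (ih _) (Nat.le_succ _)
    · exact Nat.le_refl _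

def pvSplit (lines : List String) : List Int → List (List Int)
  | [] => []
  | x :: xs =>
    let p := pvTakeChain lines [x] xs
    p.1 :: pvSplit lines p.2
termination_by l => l.length
decreasing_by
  have := pvTakeChain_len lines xs [x]
  simpa using Nat.lt_succ_of_le this

-- B-side: the stack loops on a reversed list are pvTakeChain / pvSplit on the original
lemma pvInner_rev (lines : List String) : ∀ (rest group : List Int),
    pvInner lines group rest.reverse
      = ((pvTakeChain lines group rest).1, (pvTakeChain lines group rest).2.reverse) := by
  intro rest
  induction rest with
  | nil => intro group; rw [pvInner]; simp [pvTakeChain]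
  | cons r rs ih =>
    intro group
    rw [pvInner]
    simp only [List.reverse_cons, List.getLastD_concat, List.dropLast_concat]
    by_cases hc : pvChained lines (group.getLast?.getD 0) r = true
    · simp [List.getLastD_eq_getLast?, hc, ih, pvTakeChain]
    · simp [List.getLastD_eq_getLast?, hc, pvTakeChain]

lemma pvOuter_rev (lines : List String) : ∀ (n : Nat) (rest : List Int), rest.length ≤ n →
    ∀ groups, pvOuter lines groups rest.reverse = groups ++ pvSplit lines rest := by
  intro n
  induction n with
  | zero =>
    intro rest h groups
    have : rest = [] := by
      cases rest with
      | nil => rfl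
      | cons a b => simp at h
    subst this
    rw [pvOuter]; simp [pvSplit]
  | succ n ih =>
    intro rest h groups
    match rest with
    | [] => rw [pvOuter]; simp [pvSplit]
    | x :: xs =>
      rw [pvOuter]
      simp only [List.reverse_cons, List.getLastD_concat, List.dropLast_concat]
      rw [dif_pos (by simp)]
      rw [pvInner_rev]
      rw [ih (pvTakeChain lines [x] xs).2
            (le_trans (pvTakeChain_len lines xs [x]) (by simpa using Nat.le_of_succ_le_succ h))]
      rw [pvSplit]
      simp

-- A-side: the accumulator loop, once a group has started, computes pvTakeChain / pvSplit.
-- Invariant: current ≠ [], its last element is `last` (the previously processed line number,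
-- sitting at index pre.length of the full list), and last_indent is the indent of last's line.
lemma pvLoopA_main (lines : List String) : ∀ (t pre current : List Int) (last : Int) (groups : List (List Int)),
    current.getLast? = some last →
    pvFinishA (pvLoopA (pre ++ last :: t) lines
        (groups, current, some (pvLineIndent ((PySem.List.pyGet? lines (last - 1)).getD "")))
        (PySem.List.enumerate t ((pre.length : Int) + 1)))
      = groups ++ (pvTakeChain lines current t).1 :: pvSplit lines (pvTakeChain lines current t).2 := by
  intro t
  induction t with
  | nil =>
    intro pre current last groups hlast
    have hne : current ≠ [] := by intro h; simp [h] at hlast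
    simp [PySem.List.enumerate, pvLoopA, pvFinishA, hne, pvTakeChain, pvSplit]
  | cons x xs ih =>
    intro pre current last groups hlast
    have hne : current ≠ [] := by intro h; simp [h] at hlast
    have hlastD : current.getLastD 0 = last := by
      cases hgl : current.getLast? with
      | none => rw [hgl] at hlast; cases hlast
      | some v => rw [hgl] at hlast; cases hlast; exact (List.getLastD_eq_getLast?.trans (by rw [hgl]; rfl))
    rw [PySem.List.enumerate_cons, pvLoopA]
    rw [if_neg hne]
    have hidx : ((pre.length : Int) + 1 - 1) = (pre.length : Int) := by ring
    rw [hidx, PySem.List.pyGet?_append_length]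
    simp only [Option.getD_some]
    have hrw : pre ++ last :: x :: xs = (pre ++ [last]) ++ x :: xs := by simp
    have hlen : ((pre.length : Int) + 1 + 1) = (((pre ++ [last]).length : Int) + 1) := by
      simp [List.length_append]
    have hiff : pvChained lines last x = true ↔
        (x = last + 1 ∧
         pvLineIndent ((PySem.List.pyGet? lines (x - 1)).getD "") =
           pvLineIndent ((PySem.List.pyGet? lines (last - 1)).getD "") ∧
         PySem.Str.strip ((PySem.List.pyGet? lines last).getD "") ≠ "") := by
      simp only [pvChained, Bool.and_eq_true, beq_iff_eq, bne_iff_ne, ne_eq]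
      constructor
      · rintro ⟨⟨h1, h2⟩, h3⟩
        exact ⟨h1, h2, by rw [show last = x - 1 by omega]; exact h3⟩
      · rintro ⟨h1, h2, h3⟩
        exact ⟨⟨h1, h2⟩, by rw [show (x : Int) - 1 = last by omega]; exact h3⟩
    conv_rhs => rw [pvTakeChain, hlastD]
    by_cases hch : pvChained lines last x = true
    · obtain ⟨hx, hind, hstrip⟩ := hiff.mp hch
      rw [if_pos hx, if_pos ⟨congrArg some hind, hstrip⟩, if_pos hch]
      rw [show (pvLineIndent ((PySem.List.pyGet? lines (last - 1)).getD ""))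
            = pvLineIndent ((PySem.List.pyGet? lines (x - 1)).getD "") from hind.symm]
      rw [hrw, hlen]
      exact ih (pre ++ [last]) (current ++ [x]) x groups (by simp)
    · have hb : pvFinishA (pvLoopA (pre ++ last :: x :: xs) lines
          (groups ++ [current], [x], some (pvLineIndent ((PySem.List.pyGet? lines (x - 1)).getD "")))
          (PySem.List.enumerate xs ((pre.length : Int) + 1 + 1)))
          = (groups ++ [current]) ++ (pvTakeChain lines [x] xs).1 ::
              pvSplit lines (pvTakeChain lines [x] xs).2 := by
        rw [hrw, hlen]
        exact ih (pre ++ [last]) [x] x (groups ++ [current]) (by simp)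
      rw [if_neg hch]
      have hfin : groups ++ (current, x :: xs).1 ::
          pvSplit lines (current, x :: xs).2
          = (groups ++ [current]) ++ (pvTakeChain lines [x] xs).1 ::
              pvSplit lines (pvTakeChain lines [x] xs).2 := by
        rw [pvSplit]; simp
      by_cases hx : x = last + 1
      · have hcond : ¬ (some (pvLineIndent ((PySem.List.pyGet? lines (x - 1)).getD "")) =
              some (pvLineIndent ((PySem.List.pyGet? lines (last - 1)).getD "")) ∧
            PySem.Str.strip ((PySem.List.pyGet? lines last).getD "") ≠ "") := by
          rintro ⟨h1, h2⟩
          exact hch (hiff.mpr ⟨hx, Option.some.inj h1, h2⟩)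
        rw [if_pos hx, if_neg hcond, hb, hfin]
      · rw [if_neg hx, hb, hfin]

theorem group_assignments_by_indent_py_spec : Claim_equal_group_assignments_by_indent_py := by
  intro assign lines _ _
  unfold Spec_group_assignments_by_indent_py group_assignments_by_indent_py group_assignments_by_indent_py_alt
  have halt : pvOuter lines [] assign.reverse = pvSplit lines assign := by
    simpa using pvOuter_rev lines assign.length assign (le_refl _) []
  rw [halt]
  match assign with
  | [] => simp [PySem.List.enumerate, pvLoopA, pvFinishA, pvSplit]
  | x :: xs =>
    rw [show PySem.List.enumerate (x :: xs) = (0, x) :: PySem.List.enumerate xs 1 from by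
      simp [PySem.List.enumerate_cons]]
    rw [pvSplit]
    have := pvLoopA_main lines xs [] [x] x []
    simp only [List.nil_append, List.length_nil, Nat.cast_zero, zero_add] at this
    rw [pvLoopA]
    simp only [List.nil_append]
    exact (this rfl).trans (by simp)
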